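-- pv_equiv track=rewrite | github.com/olsen1995/Life-OS-Private-Practical-Co-Pilot | modes/dayplanner.py | generate_weekly_schedule
-- ===== SOURCE A (Python) =====
-- from typing import List, Dict
--
-- DAYS = ["Monday", "Tuesday", "Wednesday", "Thursday", "Friday", "Saturday", "Sunday"]
--
-- def generate_weekly_schedule(tasks: List[str]) -> Dict[str, List[str]]:
--     """
--     Distribute tasks across the week, one per day starting from Monday.
--     Always returns Dict[str, List[str]].
--     """
--     if not tasks:
--         return {"Error": ["No tasks provided."]}
--
--     schedule: Dict[str, List[str]] = {day: [] for day in DAYS}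
--
--     for i, task in enumerate(tasks):
--         day = DAYS[i % len(DAYS)]
--         hour = 9 + (i % 8)  # 9am–4pm
--         schedule[day].append(f"{hour}:00 - {task}")
--
--     return schedule
-- ===== SOURCE B (Python) =====
-- from typing import List, Dict
--
-- DAYS = ["Monday", "Tuesday", "Wednesday", "Thursday", "Friday", "Saturday", "Sunday"]
--
-- def generate_weekly_schedule(tasks: List[str]) -> Dict[str, List[str]]:
--     """Per-day construction: day d gets the tasks at global indices d, d+7, d+14, ...,
--     labelled by the hour computed from the global index."""
--     if not tasks:
--         return {"Error": ["No tasks provided."]}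
--     return {
--         day: [f"{9 + (i % 8)}:00 - {tasks[i]}" for i in range(d, len(tasks), 7)]
--         for d, day in enumerate(DAYS)
--     }
-- ===== Notes on version B (the rewrite author's own statement) =====
-- stated objective: alternative
-- what changed: B replaces A's single flat loop that appends into a pre-built day-keyed dict with a per-day construction: for each enumerated day d it builds the day's list directly by striding over global task indices d, d+7, d+14, ...; no dict mutation or per-task append remains.
import Mathlib
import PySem

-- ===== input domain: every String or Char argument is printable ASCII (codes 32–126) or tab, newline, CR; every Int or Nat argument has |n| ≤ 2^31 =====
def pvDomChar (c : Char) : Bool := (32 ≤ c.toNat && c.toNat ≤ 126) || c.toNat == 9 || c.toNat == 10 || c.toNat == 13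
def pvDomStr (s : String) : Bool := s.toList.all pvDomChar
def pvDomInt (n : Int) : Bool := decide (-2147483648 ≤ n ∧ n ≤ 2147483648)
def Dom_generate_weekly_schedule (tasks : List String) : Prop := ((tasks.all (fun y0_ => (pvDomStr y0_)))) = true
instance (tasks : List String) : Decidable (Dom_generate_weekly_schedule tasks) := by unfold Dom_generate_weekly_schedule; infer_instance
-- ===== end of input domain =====

-- B replaces A's flat task loop appending into a pre-built day dict by a per-day construction
-- (each day's list is built directly from the stride d, d+7, d+14, …); same values, no speed claim.

-- DAYS (module-level constant of Source A / Source B)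
def pvDAYS : List String :=
  ["Monday", "Tuesday", "Wednesday", "Thursday", "Friday", "Saturday", "Sunday"]

-- ===== PORT A =====
def generate_weekly_schedule (tasks : List String) : List (String × List String) :=
  if tasks = [] then [("Error", ["No tasks provided."])]
  else
    -- schedule = {day: [] for day in DAYS}
    let schedule : PySem.Dict String (List String) :=
      pvDAYS.foldl (fun d day => d.insert day []) PySem.Dict.empty
    -- for i, task in enumerate(tasks): schedule[DAYS[i % len(DAYS)]].append(f"{hour}:00 - {task}")
    -- (DAYS[i % len(DAYS)] is always in range, so pyGetD with an unused default is exact)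
    let final := (PySem.List.enumerate tasks).foldl (fun sched p =>
      let day := PySem.List.pyGetD pvDAYS (PySem.Int.mod p.1 (PySem.List.len pvDAYS)) ""
      let hour := 9 + PySem.Int.mod p.1 8
      sched.modify day [] (fun l => l ++ [PySem.Int.toStr hour ++ ":00 - " ++ p.2])) schedule
    final.items

-- ===== PORT B =====
def generate_weekly_schedule_alt (tasks : List String) : List (String × List String) :=
  if tasks = [] then [("Error", ["No tasks provided."])]
  else
    -- {day: [label(i) for i in range(d, len(tasks), 7)] for d, day in enumerate(DAYS)}
    -- (tasks[i] is always in range for i from the stride, so pyGetD with an unused default is exact)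
    (PySem.List.enumerate pvDAYS).map (fun q =>
      (q.2, (PySem.List.pyRange q.1 (PySem.List.len tasks) 7).map (fun i =>
        PySem.Int.toStr (9 + PySem.Int.mod i 8) ++ ":00 - " ++ PySem.List.pyGetD tasks i "")))

-- ===== PRECONDITION & SPEC =====
def Spec_generate_weekly_schedule (tasks : List String) (out : List (String × List String)) : Prop := out = generate_weekly_schedule_alt tasks
instance (tasks : List String) (out : List (String × List String)) : Decidable (Spec_generate_weekly_schedule tasks out) := by unfold Spec_generate_weekly_schedule; infer_instance

-- ===== CLAIM (what is proved, stated in full; the proofs are below) =====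
def Claim_equal_generate_weekly_schedule : Prop := ∀ (tasks : List String), Dom_generate_weekly_schedule tasks → Spec_generate_weekly_schedule tasks (generate_weekly_schedule tasks)

-- ===== LEMMAS AND PROOFS =====

-- the label both programs attach to task t at global index i
def pvLab (i : Int) (t : String) : String :=
  PySem.Int.toStr (9 + PySem.Int.mod i 8) ++ ":00 - " ++ t

-- day-name comparison is index comparison, for in-range indices
lemma pvDays_beq (a : Int) (ha0 : 0 ≤ a) (ha : a < 7) (d : Nat) (hd : d < 7) :
    (PySem.List.pyGetD pvDAYS a "" == PySem.List.pyGetD pvDAYS (d : Int) "") =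
      decide (a = (d : Int)) := by
  lift a to ℕ using ha0 with b
  have hb : b < 7 := by exact_mod_cast ha
  interval_cases b <;> interval_cases d <;> decide

-- range(d, n, 7) is the residue-class-d part of range(0, n, 1)
lemma pvRange_stride (n : Nat) (d : Nat) (hd : d < 7) :
    PySem.List.pyRange (d : Int) (n : Int) 7 =
      (PySem.List.pyRange 0 (n : Int) 1).filter (fun j => decide (PySem.Int.mod j 7 = (d : Int))) := by
  have h7 : (0:Int) < 7 := by norm_num
  have pw1 : (PySem.List.pyRange (d : Int) (n : Int) 7).Pairwise (· < ·) := by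
    rw [PySem.List.pyRange_of_pos _ _ h7]
    exact List.pairwise_map.mpr ((List.pairwise_lt_range).imp (fun h => by omega))
  have pw2 : ((PySem.List.pyRange 0 (n : Int) 1).filter
      (fun j => decide (PySem.Int.mod j 7 = (d : Int)))).Pairwise (· < ·) :=
    (PySem.List.pairwise_lt_pyRange_one 0 (n : Int)).filter _
  have hmem : ∀ x : Int, x ∈ PySem.List.pyRange (d : Int) (n : Int) 7 ↔
      x ∈ (PySem.List.pyRange 0 (n : Int) 1).filter
        (fun j => decide (PySem.Int.mod j 7 = (d : Int))) := by
    intro x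
    rw [PySem.List.mem_pyRange_iff_of_pos h7]
    simp only [List.mem_filter, PySem.List.mem_pyRange_one, PySem.Int.mod_eq_emod_of_pos h7,
      decide_eq_true_eq]
    omega
  have nd1 : (PySem.List.pyRange (d : Int) (n : Int) 7).Nodup :=
    pw1.imp (fun h => ne_of_lt h)
  have nd2 : ((PySem.List.pyRange 0 (n : Int) 1).filter
      (fun j => decide (PySem.Int.mod j 7 = (d : Int)))).Nodup :=
    pw2.imp (fun h => ne_of_lt h)
  have hperm : ((PySem.List.pyRange 0 (n : Int) 1).filter
      (fun j => decide (PySem.Int.mod j 7 = (d : Int)))).Perm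
      (PySem.List.pyRange (d : Int) (n : Int) 7) :=
    (List.perm_ext_iff_of_nodup nd2 nd1).mpr (fun a => ((hmem a)).symm)
  have e1 := PySem.List.sorted_eq_of_perm_of_pairwise_lt
    (PySem.List.pyRange (d : Int) (n : Int) 7) (PySem.List.pyRange (d : Int) (n : Int) 7)
    id (List.Perm.refl _) pw1
  have e2 := PySem.List.sorted_eq_of_perm_of_pairwise_lt
    (PySem.List.pyRange (d : Int) (n : Int) 7)
    ((PySem.List.pyRange 0 (n : Int) 1).filter (fun j => decide (PySem.Int.mod j 7 = (d : Int))))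
    id hperm pw2
  rw [← e1, e2]

-- the slot B builds for day d equals the group A's flat loop collects for that day
lemma pvDay_slot (tasks : List String) (d : Nat) (hd : d < 7) :
    (PySem.List.pyRange (d : Int) (PySem.List.len tasks) 7).map
        (fun i => pvLab i (PySem.List.pyGetD tasks i "")) =
      (((PySem.List.enumerate tasks).map (fun p =>
          (PySem.List.pyGetD pvDAYS (PySem.Int.mod p.1 (PySem.List.len pvDAYS)) "", pvLab p.1 p.2))).filter
        (fun q => q.1 == PySem.List.pyGetD pvDAYS (d : Int) "")).map (fun q => q.2) := by
  have h7 : (0:Int) < 7 := by norm_num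
  rw [PySem.List.enumerate_eq_map_pyRange tasks "", List.map_map, List.filter_map, List.map_map]
  have hlen : PySem.List.len pvDAYS = (7 : Int) := by decide
  have hcond : ∀ j ∈ PySem.List.pyRange 0 (PySem.List.len tasks) 1,
      ((fun q : String × String => q.1 == PySem.List.pyGetD pvDAYS (d : Int) "") ∘
        (fun p : Int × String =>
          (PySem.List.pyGetD pvDAYS (PySem.Int.mod p.1 (PySem.List.len pvDAYS)) "", pvLab p.1 p.2)) ∘
        (fun j : Int => (j, PySem.List.pyGetD tasks j ""))) j =
      (fun j : Int => decide (PySem.Int.mod j 7 = (d : Int))) j := by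
    intro j _
    simp only [Function.comp_apply, hlen]
    exact pvDays_beq (PySem.Int.mod j 7) (PySem.Int.mod_nonneg j h7)
      (PySem.Int.mod_lt j h7) d hd
  rw [List.filter_congr hcond]
  rw [PySem.List.len_eq, ← pvRange_stride tasks.length d hd]
  rfl

-- initial dict {day: [] for day in DAYS}: every lookup with default [] gives []
lemma pvInit_getD (c : String) :
    (pvDAYS.foldl (fun (d : PySem.Dict String (List String)) day => d.insert day []) PySem.Dict.empty).getD c [] = [] := by
  have h : pvDAYS.foldl (fun (d : PySem.Dict String (List String)) day => d.insert day []) PySem.Dict.empty =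
      PySem.Dict.mk [("Monday", ([] : List String)), ("Tuesday", []), ("Wednesday", []), ("Thursday", []),
        ("Friday", []), ("Saturday", []), ("Sunday", [])] := by rfl
  rw [h, PySem.Dict.getD_eq_get?_getD]
  simp only [PySem.Dict.get?_mk_cons]
  split_ifs <;> rfl

theorem generate_weekly_schedule_spec_aux (tasks : List String) :
    generate_weekly_schedule tasks = generate_weekly_schedule_alt tasks := by
  unfold generate_weekly_schedule generate_weekly_schedule_alt
  by_cases h : tasks = []
  · simp [h]
  · simp only [if_neg h]
    have h7 : (0:Int) < 7 := by norm_num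
    -- the mapped, pair-keyed form of A's fold (definitionally equal to the ported fold)
    set gmap : Int × String → String × String := fun p =>
      (PySem.List.pyGetD pvDAYS (PySem.Int.mod p.1 (PySem.List.len pvDAYS)) "", pvLab p.1 p.2) with hgmap
    set init : PySem.Dict String (List String) :=
      pvDAYS.foldl (fun d day => d.insert day []) PySem.Dict.empty with hinit
    set finalM : PySem.Dict String (List String) :=
      ((PySem.List.enumerate tasks).map gmap).foldl
        (fun sched q => sched.modify q.1 [] (fun l => l ++ [q.2])) init with hfinalM
    have hfold : (PySem.List.enumerate tasks).foldl (fun sched p =>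
        let day := PySem.List.pyGetD pvDAYS (PySem.Int.mod p.1 (PySem.List.len pvDAYS)) ""
        let hour := 9 + PySem.Int.mod p.1 8
        sched.modify day [] (fun l => l ++ [PySem.Int.toStr hour ++ ":00 - " ++ p.2])) init = finalM := by
      rw [hfinalM, List.foldl_map]
      rfl
    rw [hfold]
    -- keys of the final dict are exactly DAYS
    have hkeysub : ∀ y ∈ (PySem.List.enumerate tasks).map (fun p => (gmap p).1), y ∈ pvDAYS := by
      intro y hy
      obtain ⟨p, _, rfl⟩ := List.mem_map.mp hy
      have hlt : PySem.Int.mod p.1 (PySem.List.len pvDAYS) < ((pvDAYS.length : Nat) : Int) := by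
        have : PySem.List.len pvDAYS = (7 : Int) := by decide
        rw [this]
        exact PySem.Int.mod_lt p.1 h7
      rw [hgmap]
      simp only []
      rw [PySem.List.pyGetD_eq_getElem pvDAYS ""
        (by have : PySem.List.len pvDAYS = (7 : Int) := by decide
            rw [this]; exact PySem.Int.mod_nonneg p.1 h7) hlt]
      exact List.getElem_mem _
    have hkeys : finalM.keys = pvDAYS := by
      have hk0 := PySem.Dict.keys_foldl_modify_key ((PySem.List.enumerate tasks).map gmap)
        (fun (q : String × String) => q.1) ([] : List String)
        (fun (_ : PySem.Dict String (List String)) (q : String × String) (l : List String) => l ++ [q.2]) init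
      refine Eq.trans hk0 ?_
      have hik : init.keys = pvDAYS := by rfl
      rw [hik, PySem.Set.update_eq_append_filter]
      have hnilf : (PySem.Set.ofList (((PySem.List.enumerate tasks).map gmap).map
          (fun (q : String × String) => q.1))).filter (fun y => !(PySem.Set.contains pvDAYS y)) = [] := by
        rw [List.filter_eq_nil_iff]
        intro y hy
        have hmem : y ∈ pvDAYS := by
          refine hkeysub y ?_
          have := (PySem.Set.mem_ofList _ y).mp hy
          rwa [List.map_map] at this
        simp [PySem.Set.contains, hmem]
      rw [hnilf, List.append_nil]
    have hnd : finalM.keys.Nodup := by rw [hkeys]; decide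
    have hget : ∀ c : String, finalM.getD c [] =
        (((PySem.List.enumerate tasks).map gmap).filter (fun q => q.1 == c)).map (fun q => q.2) := by
      intro c
      refine Eq.trans (PySem.Dict.getD_foldl_modify_append ((PySem.List.enumerate tasks).map gmap) init c) ?_
      rw [pvInit_getD c, List.nil_append]
    have hitems : finalM.items = pvDAYS.map (fun k => (k, finalM.getD k [])) := by
      rw [PySem.Dict.items_eq_map_keys finalM hnd ([] : List String), hkeys]
    rw [hitems]
    have hdays : PySem.List.enumerate pvDAYS =
        [((0:Int), "Monday"), (1, "Tuesday"), (2, "Wednesday"), (3, "Thursday"),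
         (4, "Friday"), (5, "Saturday"), (6, "Sunday")] := by rfl
    rw [hdays]
    show [("Monday", finalM.getD "Monday" []), ("Tuesday", finalM.getD "Tuesday" []),
          ("Wednesday", finalM.getD "Wednesday" []), ("Thursday", finalM.getD "Thursday" []),
          ("Friday", finalM.getD "Friday" []), ("Saturday", finalM.getD "Saturday" []),
          ("Sunday", finalM.getD "Sunday" [])] = _
    simp only [List.map_cons, List.map_nil, List.cons.injEq, Prod.mk.injEq, and_true, true_and]
    refine ⟨?_, ?_, ?_, ?_, ?_, ?_, ?_⟩ <;>
      · rw [hget]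
        first
        | exact (pvDay_slot tasks 0 (by norm_num)).symm
        | exact (pvDay_slot tasks 1 (by norm_num)).symm
        | exact (pvDay_slot tasks 2 (by norm_num)).symm
        | exact (pvDay_slot tasks 3 (by norm_num)).symm
        | exact (pvDay_slot tasks 4 (by norm_num)).symm
        | exact (pvDay_slot tasks 5 (by norm_num)).symm
        | exact (pvDay_slot tasks 6 (by norm_num)).symm

-- ===== VERDICT (by name: the statement is the Claim_ definition above) =====
theorem generate_weekly_schedule_spec : Claim_equal_generate_weekly_schedule := by
  intro tasks _
  exact generate_weekly_schedule_spec_aux tasks
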